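-- pv_equiv track=rewrite | github.com/mushorg/glastopf | glastopf/modules/handlers/emulators/dork_list/cluster.py | write_clusters
-- ===== SOURCE A (Python) =====
-- def write_clusters(url_list, labels):
--     clusters = {}
--     for url, label in zip(url_list, labels):
--         if label in clusters:
--             clusters[label].append(url)
--         else:
--             clusters[label] = [url]
--     return clusters
-- ===== SOURCE B (Python) =====
-- def write_clusters(url_list, labels):
--     pairs = list(zip(url_list, labels))
--     return {lab: [u for u, l in pairs if l == lab]
--             for lab in dict.fromkeys(l for _, l in pairs)}
-- ===== Notes on version B (the rewrite author's own statement) =====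
-- stated objective: simpler
-- what changed: Replaces A's one-pass dict build with conditional append/assign by a two-pass comprehension: dedup the labels in first-occurrence order, then collect each cluster with one filter per distinct label.
import Mathlib
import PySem

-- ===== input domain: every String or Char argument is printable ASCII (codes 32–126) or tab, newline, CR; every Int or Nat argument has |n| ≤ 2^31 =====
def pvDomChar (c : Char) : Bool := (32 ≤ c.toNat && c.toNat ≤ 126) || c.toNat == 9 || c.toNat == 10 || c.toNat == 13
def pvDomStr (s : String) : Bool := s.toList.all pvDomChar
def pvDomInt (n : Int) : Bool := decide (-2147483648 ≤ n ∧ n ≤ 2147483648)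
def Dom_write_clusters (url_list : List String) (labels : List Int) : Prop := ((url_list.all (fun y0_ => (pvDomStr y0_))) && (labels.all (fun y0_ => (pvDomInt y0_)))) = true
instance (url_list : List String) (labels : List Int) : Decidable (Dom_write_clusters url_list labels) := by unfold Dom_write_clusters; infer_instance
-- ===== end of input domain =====

-- B replaces A's one-pass dict-insertion build by two passes — dedup the labels in first-occurrence order, then filter
-- the pairs once per distinct label — a simpler decomposition returning the same dict (not claimed faster).


-- ===== PORT A =====
-- for (url, label) in zip(url_list, labels): if label in clusters: clusters[label].append(url) else clusters[label] = [url]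
def write_clusters (url_list : List String) (labels : List Int) : List (Int × List String) :=
  ((url_list.zip labels).foldl
    (fun clusters p =>
      if clusters.contains p.2 then clusters.modify p.2 [] (fun xs => xs ++ [p.1])
      else clusters.insert p.2 [p.1])
    PySem.Dict.empty).items

-- ===== PORT B =====
-- pairs = list(zip(...)); {lab: [u for u, l in pairs if l == lab] for lab in dict.fromkeys(l for _, l in pairs)}
def write_clusters_alt (url_list : List String) (labels : List Int) : List (Int × List String) :=
  let pairs := url_list.zip labels
  (PySem.List.dedup (pairs.map (fun p => p.2))).map
    (fun lab => (lab, (pairs.filter (fun p => p.2 == lab)).map (fun p => p.1)))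

-- ===== PRECONDITION & SPEC =====
def Spec_write_clusters (url_list : List String) (labels : List Int) (out : List (Int × List String)) : Prop := out = write_clusters_alt url_list labels
instance (url_list : List String) (labels : List Int) (out : List (Int × List String)) : Decidable (Spec_write_clusters url_list labels out) := by unfold Spec_write_clusters; infer_instance

-- ===== CLAIM (what is proved, stated in full; the proofs are below) =====
def Claim_equal_write_clusters : Prop := ∀ (url_list : List String) (labels : List Int), Dom_write_clusters url_list labels → Spec_write_clusters url_list labels (write_clusters url_list labels)

-- ===== LEMMAS AND PROOFS =====

-- A's branch ("append if present, singleton otherwise") is exactly Dict.modify with default [].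
lemma wc_step_eq (clusters : PySem.Dict Int (List String)) (p : String × Int) :
    (if clusters.contains p.2 then clusters.modify p.2 [] (fun xs => xs ++ [p.1])
     else clusters.insert p.2 [p.1])
    = clusters.modify p.2 [] (fun xs => xs ++ [p.1]) := by
  split_ifs with h
  · rfl
  · simp [PySem.Dict.modify,
      PySem.Dict.getD_of_not_contains clusters [] (Bool.not_eq_true _ ▸ h)]

-- the modify-loop's items, computed key by key
lemma wc_fold_items (url_list : List String) (labels : List Int) :
    ((url_list.zip labels).foldl
      (fun d (p : String × Int) => d.modify p.2 [] (fun xs => xs ++ [p.1]))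
      (PySem.Dict.empty : PySem.Dict Int (List String))).items
    = (PySem.List.dedup ((url_list.zip labels).map (fun p => p.2))).map
        (fun lab => (lab, ((url_list.zip labels).filter (fun p => p.2 == lab)).map (fun p => p.1))) := by
  set pairs := url_list.zip labels with hp
  have hswap : pairs.foldl (fun d (p : String × Int) => d.modify p.2 [] (fun xs => xs ++ [p.1]))
      (PySem.Dict.empty : PySem.Dict Int (List String))
      = (pairs.map Prod.swap).foldl (fun d (q : Int × String) => d.modify q.1 [] (fun xs => xs ++ [q.2])) PySem.Dict.empty := by
    rw [List.foldl_map]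
    rfl
  rw [hswap]
  set d := (pairs.map Prod.swap).foldl (fun d (q : Int × String) => d.modify q.1 [] (fun xs => xs ++ [q.2])) (PySem.Dict.empty : PySem.Dict Int (List String)) with hd
  have hnd : d.keys.Nodup := by
    rw [hd]
    exact PySem.Dict.nodup_keys_foldl_modify_key _ _ _ _ _ PySem.Dict.nodup_keys_empty
  have hkeys : d.keys = PySem.List.dedup (pairs.map (fun p => p.2)) := by
    rw [hd, PySem.Dict.keys_foldl_modify_key]
    simp [PySem.List.dedup_eq_ofList, PySem.Dict.keys_empty, PySem.Set.update,
      PySem.Set.ofList_eq_foldl, List.map_map, Function.comp_def]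
  have hget : ∀ c, d.getD c [] = (pairs.filter (fun p => p.2 == c)).map (fun p => p.1) := by
    intro c
    rw [hd, PySem.Dict.getD_foldl_modify_append]
    simp [List.filter_map, List.map_map, Function.comp_def]
  rw [PySem.Dict.items_eq_map_keys d hnd [], hkeys]
  exact List.map_congr_left (fun k _ => by rw [hget k])

-- ===== VERDICT (by name: the statement is the Claim_ definition above) =====
theorem write_clusters_spec : Claim_equal_write_clusters := by
  intro url_list labels _
  unfold Spec_write_clusters write_clusters write_clusters_alt
  have hfun : (fun (clusters : PySem.Dict Int (List String)) (p : String × Int) =>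
      if clusters.contains p.2 then clusters.modify p.2 [] (fun xs => xs ++ [p.1])
      else clusters.insert p.2 [p.1])
      = fun clusters p => clusters.modify p.2 [] (fun xs => xs ++ [p.1]) :=
    funext fun c => funext fun p => wc_step_eq c p
  rw [hfun]
  exact wc_fold_items url_list labels
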